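-- pv_equiv track=rewrite | github.com/jpokinter87/cine_org | src/services/organizer.py | get_series_type
-- ===== SOURCE A (Python) =====
-- def get_series_type(genres: tuple[str, ...]) -> str:
--     """
--     Determine le type de serie selon les genres.
--
--     Classification:
--     - "Anime" dans les genres -> "Mangas" (animation japonaise)
--     - "Animation" dans les genres -> "Animation" (animation occidentale)
--     - Autre -> "Séries TV"
--
--     Args:
--         genres: Tuple des genres de la serie.
--
--     Returns:
--         Type de serie: "Mangas", "Animation" ou "Séries TV"
--     """
--     if not genres:
--         return "Séries TV"
--
--     # Normaliser les genres en minuscules pour la comparaison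
--     genres_lower = [g.lower() for g in genres]
--
--     # Anime (japonais) -> Mangas
--     if "anime" in genres_lower:
--         return "Mangas"
--
--     # Animation (occidentale) -> Animation
--     if "animation" in genres_lower:
--         return "Animation"
--
--     # Tout le reste -> Séries TV
--     return "Séries TV"
-- ===== SOURCE B (Python) =====
-- def get_series_type(genres: tuple[str, ...]) -> str:
--     # Rank each genre (0 = anime, 1 = animation, 2 = other), keep the minimum,
--     # then index a label table: no membership scans, no flags.
--     rank = {"anime": 0, "animation": 1}
--     labels = ("Mangas", "Animation", "Séries TV")
--     best = 2
--     for g in genres: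
--         r = rank.get(g.lower(), 2)
--         if r < best:
--             best = r
--     return labels[best]
-- ===== Notes on version B (the rewrite author's own statement) =====
-- stated objective: alternative
-- what changed: Replaces the lowercased-list-plus-two-membership-scans with a rank/reduce/lookup pipeline: each genre is mapped to a numeric priority via a dictionary, the minimum priority is folded over the list, and the answer is read from a label table.
import Mathlib
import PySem

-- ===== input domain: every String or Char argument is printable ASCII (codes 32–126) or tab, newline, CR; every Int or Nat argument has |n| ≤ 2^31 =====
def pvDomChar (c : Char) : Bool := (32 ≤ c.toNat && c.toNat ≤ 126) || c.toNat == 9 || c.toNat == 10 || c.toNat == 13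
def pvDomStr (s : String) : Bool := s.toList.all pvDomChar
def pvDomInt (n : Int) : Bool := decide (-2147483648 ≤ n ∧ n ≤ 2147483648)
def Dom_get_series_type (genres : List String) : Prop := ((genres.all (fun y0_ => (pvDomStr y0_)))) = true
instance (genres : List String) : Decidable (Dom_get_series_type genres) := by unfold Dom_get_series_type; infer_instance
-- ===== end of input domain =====

-- B replaces A's lowercased list and two membership scans with a rank/min-reduce/label-table pipeline (objective: alternative).


-- ===== PORT A =====
def get_series_type (genres : List String) : String :=
  if genres = [] then "Séries TV"
  else
    let genres_lower := genres.map (fun g => PySem.Str.lower g)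
    if "anime" ∈ genres_lower then "Mangas"
    else if "animation" ∈ genres_lower then "Animation"
    else "Séries TV"

-- ===== PORT B =====
def get_series_type_alt (genres : List String) : String :=
  let rank : PySem.Dict String Int := PySem.Dict.ofList [("anime", 0), ("animation", 1)]
  let labels : List String := ["Mangas", "Animation", "Séries TV"]
  let best := genres.foldl (fun (best : Int) g =>
    let r := rank.getD (PySem.Str.lower g) 2
    if r < best then r else best) 2
  (PySem.List.pyGet? labels best).getD ""   -- best ∈ {0,1,2}, always in range

-- ===== PRECONDITION & SPEC =====
def Spec_get_series_type (genres : List String) (out : String) : Prop := out = get_series_type_alt genres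
instance (genres : List String) (out : String) : Decidable (Spec_get_series_type genres out) := by unfold Spec_get_series_type; infer_instance

-- ===== CLAIM (what is proved, stated in full; the proofs are below) =====
def Claim_equal_get_series_type : Prop := ∀ (genres : List String), Dom_get_series_type genres → Spec_get_series_type genres (get_series_type genres)

-- ===== LEMMAS AND PROOFS =====

-- the minimum rank of a list of genres, as A's membership facts describe it
def minRank (genres : List String) : Int :=
  if "anime" ∈ genres.map (fun g => PySem.Str.lower g) then 0
  else if "animation" ∈ genres.map (fun g => PySem.Str.lower g) then 1
  else 2

theorem minRank_cases (genres : List String) :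
    minRank genres = 0 ∨ minRank genres = 1 ∨ minRank genres = 2 := by
  unfold minRank; split_ifs <;> simp

-- per-element rank, as B's dictionary computes it
def rankOf (g : String) : Int :=
  if PySem.Str.lower g = "anime" then 0
  else if PySem.Str.lower g = "animation" then 1 else 2

theorem getD_rankOf (g : String) :
    (PySem.Dict.ofList [("anime", (0:Int)), ("animation", 1)]).getD (PySem.Str.lower g) 2 = rankOf g := by
  unfold rankOf
  by_cases h1 : PySem.Str.lower g = "anime"
  · rw [h1]; simp [h1]; decide
  · by_cases h2 : PySem.Str.lower g = "animation"
    · rw [h2]; simp [h1, h2]; decide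
    · have e1 : ("anime" == PySem.Str.lower g) = false := by simp [Ne.symm h1]
      have e2 : ("animation" == PySem.Str.lower g) = false := by simp [Ne.symm h2]
      simp [PySem.Dict.ofList, PySem.Dict.getD, PySem.Dict.update, PySem.Dict.empty,
        PySem.Dict.insert, PySem.Dict.get?, List.find?, e1, e2, h1, h2]

theorem minRank_cons (g : String) (gs : List String) :
    minRank (g :: gs) = min (rankOf g) (minRank gs) := by
  unfold minRank rankOf
  simp only [List.map_cons, List.mem_cons]
  split_ifs <;> simp_all <;> omega

theorem rankOf_le_two (g : String) : rankOf g ≤ 2 := by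
  unfold rankOf; split_ifs <;> omega

-- B's fold (with the dictionary lookup rewritten to rankOf) computes min b (minRank genres)
theorem fold_minRank (genres : List String) (b : Int) (hb : b ≤ 2) :
    genres.foldl (fun (best : Int) g =>
      let r := rankOf g
      if r < best then r else best) b
    = min b (minRank genres) := by
  induction genres generalizing b with
  | nil => simp [minRank]; omega
  | cons g gs ih =>
    rw [List.foldl_cons]
    dsimp only
    rw [ih _ (by have := rankOf_le_two g; split_ifs <;> omega), minRank_cons]
    rcases minRank_cases gs with h | h | h <;> rw [h] <;>
      have := rankOf_le_two g <;> split_ifs <;> omega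

-- ===== VERDICT (by name: the statement is the Claim_ definition above) =====
theorem get_series_type_spec : Claim_equal_get_series_type := by
  intro genres _
  unfold Spec_get_series_type get_series_type get_series_type_alt
  simp only [getD_rankOf]
  rw [fold_minRank _ _ (by omega)]
  cases genres with
  | nil => simp [minRank]
  | cons g gs =>
    simp only [if_neg (List.cons_ne_nil g gs)]
    unfold minRank
    split_ifs with h1 h2 <;>
      simp [PySem.List.pyGet?, PySem.List.pyIdx?]
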